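-- pv_equiv track=rewrite | github.com/maatanyy/codingtest_study | 프로그래머스/lv1/42840. 모의고사/모의고사.py | solution
-- ===== SOURCE A (Python) =====
-- def solution(answers):
--
--     one = [1,2,3,4,5]
--     two = [2,1,2,3,2,4,2,5]
--     three = [3,3,1,1,2,2,4,4,5,5]
--     count = [0,0,0]
--     result = []
--
--     for x,y in enumerate(answers):
--         if one[x%len(one)] == y:
--             count[0]+=1
--         if two[x%len(two)] == y:
--             count[1]+=1
--         if three[x%len(three)] == y:
--             count[2]+=1
--
--     for idx, val in enumerate(count):
--         if val == max(count):
--             result.append(idx+1)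
--
--
--     return result
-- ===== SOURCE B (Python) =====
-- def solution(answers):
--     # Histogram approach: all three patterns are periodic with period dividing
--     # lcm(5,8,10)=40, so bucket the answers by (index mod 40, value) once, then
--     # score each pattern from the 40 residue classes instead of rescanning answers.
--     occ = {}
--     for i, a in enumerate(answers):
--         key = (i % 40, a)
--         occ[key] = occ.get(key, 0) + 1
--     patterns = [[1, 2, 3, 4, 5],
--                 [2, 1, 2, 3, 2, 4, 2, 5],
--                 [3, 3, 1, 1, 2, 2, 4, 4, 5, 5]]
--     scores = [sum(occ.get((r, p[r % len(p)]), 0) for r in range(40))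
--               for p in patterns]
--     best = max(scores)
--     return [i + 1 for i, s in enumerate(scores) if s == best]
-- ===== Notes on version B (the rewrite author's own statement) =====
-- stated objective: alternative
-- what changed: B replaces A's per-element scan with three comparisons per answer by a residue-class histogram: one pass buckets answers into a dict keyed by (index mod 40, value) (40 = lcm of the pattern periods), then each pattern is scored by a fixed 40-term lookup sum over the residue classes, and the argmax phase is separate.
import Mathlib
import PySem

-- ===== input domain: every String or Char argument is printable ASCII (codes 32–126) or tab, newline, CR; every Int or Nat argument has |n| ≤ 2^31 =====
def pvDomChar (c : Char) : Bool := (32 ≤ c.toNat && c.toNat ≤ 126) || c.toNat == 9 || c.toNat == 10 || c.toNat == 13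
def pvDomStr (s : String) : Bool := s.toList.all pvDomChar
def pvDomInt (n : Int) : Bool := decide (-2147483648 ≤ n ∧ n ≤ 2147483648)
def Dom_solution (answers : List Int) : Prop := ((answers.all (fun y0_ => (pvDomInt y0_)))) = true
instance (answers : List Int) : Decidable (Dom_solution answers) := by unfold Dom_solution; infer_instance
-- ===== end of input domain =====

-- B replaces A's fused per-element scan (three comparisons per answer into a mutable count list)
-- by a residue-class histogram: one pass buckets answers by (index mod 40, value), then each
-- pattern is scored by a fixed 40-term lookup sum; same cost, a different algorithm.

-- ===== PORT A =====
-- the body of A's fused for-loop over enumerate(answers); the pattern index x % len(p) is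
-- always in range, so list indexing is ported with pyGetD (the default is never used).
def pvStepA (c : Int × Int × Int) (xy : Int × Int) : Int × Int × Int :=
  let one : List Int := [1, 2, 3, 4, 5]
  let two : List Int := [2, 1, 2, 3, 2, 4, 2, 5]
  let three : List Int := [3, 3, 1, 1, 2, 2, 4, 4, 5, 5]
  let c := if PySem.List.pyGetD one (PySem.Int.mod xy.1 (one.length : Int)) 0 == xy.2
           then (c.1 + 1, c.2.1, c.2.2) else c
  let c := if PySem.List.pyGetD two (PySem.Int.mod xy.1 (two.length : Int)) 0 == xy.2
           then (c.1, c.2.1 + 1, c.2.2) else c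
  if PySem.List.pyGetD three (PySem.Int.mod xy.1 (three.length : Int)) 0 == xy.2
  then (c.1, c.2.1, c.2.2 + 1) else c

def solution (answers : List Int) : List Int :=
  let count : Int × Int × Int := (PySem.List.enumerate answers).foldl pvStepA (0, 0, 0)
  let countL : List Int := [count.1, count.2.1, count.2.2]
  let m : Int := (PySem.List.max? countL (fun v => v)).getD 0   -- max(count); countL is nonempty
  (PySem.List.enumerate countL).foldl
    (fun r iv => if iv.2 == m then r ++ [iv.1 + 1] else r) []

-- ===== PORT B =====
-- the bucket key (i % 40, a) of an enumerated answer
def pvKey (ia : Int × Int) : Int × Int := (PySem.Int.mod ia.1 40, ia.2)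

def solution_alt (answers : List Int) : List Int :=
  -- occ[key] = occ.get(key, 0) + 1 over enumerate(answers)
  let occ : PySem.Dict (Int × Int) Int :=
    (PySem.List.enumerate answers).foldl
      (fun d ia => let k := pvKey ia; d.insert k (d.getD k 0 + 1)) PySem.Dict.empty
  let patterns : List (List Int) :=
    [[1, 2, 3, 4, 5], [2, 1, 2, 3, 2, 4, 2, 5], [3, 3, 1, 1, 2, 2, 4, 4, 5, 5]]
  -- sum(occ.get((r, p[r % len(p)]), 0) for r in range(40))
  let scores : List Int := patterns.map (fun p =>
    (PySem.List.pyRange 0 40 1).foldl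
      (fun s r => s + occ.getD (r, PySem.List.pyGetD p (PySem.Int.mod r (p.length : Int)) 0) 0) 0)
  let best : Int := (PySem.List.max? scores (fun v => v)).getD 0   -- max(scores); nonempty
  ((PySem.List.enumerate scores).filter (fun is => is.2 == best)).map (fun is => is.1 + 1)

-- ===== PRECONDITION & SPEC =====
def Spec_solution (answers : List Int) (out : List Int) : Prop := out = solution_alt answers
instance (answers : List Int) (out : List Int) : Decidable (Spec_solution answers out) := by unfold Spec_solution; infer_instance

-- ===== CLAIM (what is proved, stated in full; the proofs are below) =====
def Claim_equal_solution : Prop := ∀ (answers : List Int), Dom_solution answers → Spec_solution answers (solution answers)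

-- ===== LEMMAS AND PROOFS =====

-- the match test for a pattern p at an enumerated element
def pvHit (p : List Int) (ia : Int × Int) : Bool :=
  PySem.List.pyGetD p (PySem.Int.mod ia.1 (p.length : Int)) 0 == ia.2

-- A's fused loop splits into the three independent counts
lemma loopA_eq (l : List (Int × Int)) (c : Int × Int × Int) :
    l.foldl pvStepA c
    = (c.1 + (l.countP (pvHit [1, 2, 3, 4, 5]) : Int),
       c.2.1 + (l.countP (pvHit [2, 1, 2, 3, 2, 4, 2, 5]) : Int),
       c.2.2 + (l.countP (pvHit [3, 3, 1, 1, 2, 2, 4, 4, 5, 5]) : Int)) := by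
  induction l generalizing c with
  | nil => simp
  | cons hd tl ih =>
    simp only [List.foldl_cons, List.countP_cons]
    rw [ih]
    obtain ⟨c0, c1, c2⟩ := c
    simp only [pvStepA, pvHit]
    split_ifs <;> simp [Prod.ext_iff] <;> omega

-- the residue of the residue: L ∣ 40 → (i % 40) % L = i % L
lemma pvModMod (i L : Int) (hpos : 0 < L) (hdvd : L ∣ 40) :
    PySem.Int.mod (PySem.Int.mod i 40) L = PySem.Int.mod i L := by
  rw [PySem.Int.mod_eq_emod_of_pos (a := i) (by norm_num),
      PySem.Int.mod_eq_emod_of_pos (b := L) hpos,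
      PySem.Int.mod_eq_emod_of_pos (b := L) hpos,
      Int.emod_emod_of_dvd _ hdvd]

-- one enumerated answer contributes to exactly one residue bucket, the matching one
lemma pvIndicator_sum (p : List Int) (hpos : 0 < (p.length : Int))
    (hdvd : ((p.length : Int)) ∣ 40) (i a : Int) :
    ((PySem.List.pyRange 0 40 1).map
      (fun r => if ((r, PySem.List.pyGetD p (PySem.Int.mod r (p.length : Int)) 0) == pvKey (i, a))
                then (1 : Int) else 0)).sum
    = if pvHit p (i, a) then 1 else 0 := by
  rw [PySem.List.sum_map_ite_one_zero]
  have hm0 : 0 ≤ PySem.Int.mod i 40 := PySem.Int.mod_nonneg i (by norm_num)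
  have hm40 : PySem.Int.mod i 40 < 40 := PySem.Int.mod_lt i (by norm_num)
  have hmem : PySem.Int.mod i 40 ∈ PySem.List.pyRange 0 40 1 := by
    rw [PySem.List.mem_pyRange_one]; exact ⟨hm0, hm40⟩
  have hM : PySem.Int.mod i 40 = i % 40 := PySem.Int.mod_eq_emod_of_pos (by norm_num)
  have hgm : PySem.List.pyGetD p (PySem.Int.mod (i % 40) (p.length : Int)) 0
      = PySem.List.pyGetD p (PySem.Int.mod i (p.length : Int)) 0 := by
    rw [← hM, pvModMod i _ hpos hdvd]
  rw [hM] at hmem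
  by_cases hga : PySem.List.pyGetD p (PySem.Int.mod i (p.length : Int)) 0 = a
  · have hhit : pvHit p (i, a) = true := by simp [pvHit, hga]
    have hcong : ∀ r ∈ PySem.List.pyRange 0 40 1,
        ((r, PySem.List.pyGetD p (PySem.Int.mod r (p.length : Int)) 0) == pvKey (i, a))
        = (r == (i % 40 : Int)) := by
      intro r _
      by_cases hr : r = (i % 40 : Int)
      · subst hr; simp [pvKey, hgm, hga]
      · simp [pvKey, Prod.ext_iff, hr]
    rw [List.countP_congr (fun r hr => by rw [hcong r hr])]
    have hcnt : List.countP (fun r => r == (i % 40 : Int)) (PySem.List.pyRange 0 40 1)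
        = List.count ((i % 40 : Int)) (PySem.List.pyRange 0 40 1) := rfl
    rw [hcnt, List.count_eq_one_of_mem (PySem.List.nodup_pyRange_one 0 40) hmem, hhit]
    rfl
  · have hhit : pvHit p (i, a) = false := by simp [pvHit, hga]
    have hcong : ∀ r ∈ PySem.List.pyRange 0 40 1,
        ((r, PySem.List.pyGetD p (PySem.Int.mod r (p.length : Int)) 0) == pvKey (i, a))
        = false := by
      intro r _
      by_cases hr : r = (i % 40 : Int)
      · subst hr; simp [pvKey, hgm, hga]
      · simp [pvKey, Prod.ext_iff, hr]
    rw [List.countP_congr (fun r hr => by rw [hcong r hr]), hhit]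
    simp

-- summing the bucket counts over the 40 residue classes recovers the match count
lemma pvBucket_sum (p : List Int) (hpos : 0 < (p.length : Int))
    (hdvd : ((p.length : Int)) ∣ 40) (l : List (Int × Int)) :
    ((PySem.List.pyRange 0 40 1).map
      (fun r => ((l.map pvKey).count
        (r, PySem.List.pyGetD p (PySem.Int.mod r (p.length : Int)) 0) : Int))).sum
    = (l.countP (pvHit p) : Int) := by
  induction l with
  | nil => simp
  | cons x t ih =>
    obtain ⟨i, a⟩ := x
    have hc : ∀ r : Int,
        (((pvKey (i, a) :: t.map pvKey).count
           (r, PySem.List.pyGetD p (PySem.Int.mod r (p.length : Int)) 0) : Int))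
        = ((t.map pvKey).count
           (r, PySem.List.pyGetD p (PySem.Int.mod r (p.length : Int)) 0) : Int)
          + (if ((r, PySem.List.pyGetD p (PySem.Int.mod r (p.length : Int)) 0) == pvKey (i, a))
             then (1 : Int) else 0) := by
      intro r
      rw [List.count_cons]
      by_cases h : (r, PySem.List.pyGetD p (PySem.Int.mod r (p.length : Int)) 0) = pvKey (i, a)
      · simp [h]
      · simp [h]
        exact fun he => h he.symm
    simp only [List.map_cons, hc]
    rw [PySem.List.sum_map_add_int, ih, pvIndicator_sum p hpos hdvd i a,
        List.countP_cons]
    by_cases h : pvHit p (i, a) = true <;> simp [h]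

-- B's score fold for pattern p equals the match count of p
lemma pvScoreB_eq (p : List Int) (hpos : 0 < (p.length : Int))
    (hdvd : ((p.length : Int)) ∣ 40) (l : List (Int × Int)) :
    (PySem.List.pyRange 0 40 1).foldl
      (fun s r => s + (l.foldl
          (fun d ia => let k := pvKey ia; d.insert k (d.getD k 0 + 1)) PySem.Dict.empty).getD
        (r, PySem.List.pyGetD p (PySem.Int.mod r (p.length : Int)) 0) 0) 0
    = (l.countP (pvHit p) : Int) := by
  have hocc : l.foldl (fun d ia => let k := pvKey ia; d.insert k (d.getD k 0 + 1)) PySem.Dict.empty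
      = PySem.Dict.counter (l.map pvKey) := by
    rw [← PySem.Dict.foldl_insert_getD_add_one_eq_counter, List.foldl_map]
  rw [hocc, PySem.List.foldl_add, ← pvBucket_sum p hpos hdvd l]
  simp [PySem.Dict.getD_counter]

-- ===== VERDICT (by name: the statement is the Claim_ definition above) =====
theorem solution_spec : Claim_equal_solution := by
  unfold Claim_equal_solution
  intro answers _
  unfold Spec_solution solution solution_alt
  simp only [List.map_cons, List.map_nil]
  rw [loopA_eq,
      pvScoreB_eq [1, 2, 3, 4, 5] (by norm_num) (by norm_num) (PySem.List.enumerate answers),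
      pvScoreB_eq [2, 1, 2, 3, 2, 4, 2, 5] (by norm_num) (by norm_num) (PySem.List.enumerate answers),
      pvScoreB_eq [3, 3, 1, 1, 2, 2, 4, 4, 5, 5] (by norm_num) (by norm_num) (PySem.List.enumerate answers)]
  simp only [zero_add]
  rw [PySem.List.foldl_append_if
        (p := fun iv : Int × Int =>
          iv.2 == (PySem.List.max? [((PySem.List.enumerate answers).countP (pvHit [1, 2, 3, 4, 5]) : Int),
                                    ((PySem.List.enumerate answers).countP (pvHit [2, 1, 2, 3, 2, 4, 2, 5]) : Int),
                                    ((PySem.List.enumerate answers).countP (pvHit [3, 3, 1, 1, 2, 2, 4, 4, 5, 5]) : Int)] (fun v => v)).getD 0)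
        (f := fun iv : Int × Int => iv.1 + 1)]
  simp
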